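-- pv_equiv track=rewrite | github.com/adamkadda/what-chord | what_chord.py | check_inversion
-- ===== SOURCE A (Python) =====
-- def check_inversion(inversion):
--
--     for interval in inversion:
--         if interval > 21:
--             return False
--
--     third_or_sus = [1, 2, 3, 4, 5, 6]
--
--     # check whether a third or sus exists in this inversion
--     for interval in inversion:
--         if interval in third_or_sus:
--             return True
--
--     return False
-- ===== SOURCE B (Python) =====
-- def check_inversion(inversion):
--     # Single pass: return False on the first interval > 21 (that check first,
--     # per element), remember whether a third/sus interval was seen.
--     has_third = False
--     for interval in inversion:
--         if interval > 21:
--             return False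
--         if 1 <= interval <= 6:
--             has_third = True
--     return has_third
-- ===== Notes on version B (the rewrite author's own statement) =====
-- stated objective: simpler
-- what changed: The two sequential scans (one for intervals > 21, one for a third/sus interval) are merged into a single pass that short-circuits on > 21 and carries a has_third flag, returning the flag at the end.
import Mathlib
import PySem

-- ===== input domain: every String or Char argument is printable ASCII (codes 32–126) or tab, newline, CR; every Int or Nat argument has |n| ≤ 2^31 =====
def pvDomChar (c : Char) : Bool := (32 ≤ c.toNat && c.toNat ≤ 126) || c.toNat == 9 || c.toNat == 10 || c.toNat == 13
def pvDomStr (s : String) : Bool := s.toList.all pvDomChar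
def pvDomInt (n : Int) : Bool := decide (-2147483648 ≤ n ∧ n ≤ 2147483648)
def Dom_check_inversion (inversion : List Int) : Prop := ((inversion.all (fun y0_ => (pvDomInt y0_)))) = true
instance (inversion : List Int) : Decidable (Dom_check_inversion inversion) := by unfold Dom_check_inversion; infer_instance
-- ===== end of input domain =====

-- B merges A's two scans into one pass with a has_third flag (objective: simpler).


-- ===== PORT A =====
-- second loop of A: first interval in [1,2,3,4,5,6] returns True, else False at the end
def ciLoop2 : List Int → Bool
  | [] => false
  | x :: xs => if x ∈ ([1, 2, 3, 4, 5, 6] : List Int) then true else ciLoop2 xs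

-- first loop of A: any interval > 21 returns False; when exhausted, fall through to loop 2 over the whole list
def ciLoop1 (inversion : List Int) : List Int → Bool
  | [] => ciLoop2 inversion
  | x :: xs => if x > 21 then false else ciLoop1 inversion xs

def check_inversion (inversion : List Int) : Bool := ciLoop1 inversion inversion

-- ===== PORT B =====
-- single pass carrying the has_third flag
def ciAltGo : List Int → Bool → Bool
  | [], h => h
  | x :: xs, h => if x > 21 then false else ciAltGo xs (if 1 ≤ x ∧ x ≤ 6 then true else h)

def check_inversion_alt (inversion : List Int) : Bool := ciAltGo inversion false

-- ===== PRECONDITION & SPEC =====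
def Spec_check_inversion (inversion : List Int) (out : Bool) : Prop := out = check_inversion_alt inversion
instance (inversion : List Int) (out : Bool) : Decidable (Spec_check_inversion inversion out) := by unfold Spec_check_inversion; infer_instance

-- ===== CLAIM (what is proved, stated in full; the proofs are below) =====
def Claim_equal_check_inversion : Prop := ∀ (inversion : List Int), Dom_check_inversion inversion → Spec_check_inversion inversion (check_inversion inversion)

-- ===== LEMMAS AND PROOFS =====
theorem ciLoop2_eq_any (l : List Int) : ciLoop2 l = l.any (fun x => decide (1 ≤ x ∧ x ≤ 6)) := by
  induction l with
  | nil => rfl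
  | cons x xs ih =>
    simp only [ciLoop2, List.any_cons, ← ih]
    by_cases hx : x ∈ ([1, 2, 3, 4, 5, 6] : List Int)
    · have : (1 ≤ x ∧ x ≤ 6) := by fin_cases hx <;> omega
      simp [hx, this]
    · have : ¬ (1 ≤ x ∧ x ≤ 6) := by
        intro ⟨h1, h2⟩
        apply hx
        interval_cases x <;> simp
      simp [hx, this]

theorem ciLoop1_eq (inv l : List Int) :
    ciLoop1 inv l = if l.any (fun x => decide (x > 21)) then false else ciLoop2 inv := by
  induction l with
  | nil => simp [ciLoop1]
  | cons x xs ih =>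
    simp only [ciLoop1, List.any_cons, ih]
    by_cases hx : x > 21 <;> simp [hx]

theorem ciAltGo_eq (l : List Int) (h : Bool) :
    ciAltGo l h = if l.any (fun x => decide (x > 21)) then false
                  else (h || l.any (fun x => decide (1 ≤ x ∧ x ≤ 6))) := by
  induction l generalizing h with
  | nil => simp [ciAltGo]
  | cons x xs ih =>
    simp only [ciAltGo, List.any_cons, ih]
    by_cases hx : x > 21
    · simp [hx]
    · by_cases h3 : (1 ≤ x ∧ x ≤ 6) <;> simp [hx, h3, Bool.or_comm]

-- ===== VERDICT (by name: the statement is the Claim_ definition above) =====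
theorem check_inversion_spec : Claim_equal_check_inversion := by
  intro inversion _
  show check_inversion inversion = check_inversion_alt inversion
  rw [check_inversion, check_inversion_alt, ciLoop1_eq, ciAltGo_eq, ciLoop2_eq_any]
  simp
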